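-- pv_equiv track=rewrite | github.com/zazencodes/ml-quest-1-demand-forecasting | course-meta/build_course_content_for_site.py | create_preview_content
-- ===== SOURCE A (Python) =====
-- MARKDOWN_PREVIEW_LINES = 20
--
-- def create_preview_content(content_lines):
--     """
--     Create preview version ensuring math blocks aren't split
--
--     Args:
--         content_lines (list): List of lines from the markdown file
--
--     Returns:
--         list: Preview lines that don't break math blocks
--     """
--     preview_lines = []
--     in_math_block = False
--
--     for i, line in enumerate(content_lines):
--         # If we've hit our preview limit and we're not in a math block
--         if i >= MARKDOWN_PREVIEW_LINES and not in_math_block: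
--             break
--
--         # Check for math block markers
--         if line.strip() == "$$":
--             in_math_block = not in_math_block
--
--         preview_lines.append(line)
--
--     return preview_lines
-- ===== SOURCE B (Python) =====
-- MARKDOWN_PREVIEW_LINES = 20
--
-- def create_preview_content(content_lines):
--     # Phase 1: take the plain preview slice.
--     preview = list(content_lines[:MARKDOWN_PREVIEW_LINES])
--     # Phase 2: if the slice ends inside a math block (odd number of "$$" fences),
--     # extend through the closing "$$" (or to the end of the input).
--     if sum(1 for l in preview if l.strip() == "$$") % 2 == 0:
--         return preview
--     for line in content_lines[MARKDOWN_PREVIEW_LINES:]: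
--         preview.append(line)
--         if line.strip() == "$$":
--             break
--     return preview
-- ===== Notes on version B (the rewrite author's own statement) =====
-- stated objective: simpler
-- what changed: Replaces A's single index-guarded pass carrying (i, in_math_block) with a two-phase decomposition: take the 20-line slice, decide the math-block state by counting '$$' fence lines mod 2, and only if inside a block extend with a second loop that stops right after the first closing '$$'.
import Mathlib
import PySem

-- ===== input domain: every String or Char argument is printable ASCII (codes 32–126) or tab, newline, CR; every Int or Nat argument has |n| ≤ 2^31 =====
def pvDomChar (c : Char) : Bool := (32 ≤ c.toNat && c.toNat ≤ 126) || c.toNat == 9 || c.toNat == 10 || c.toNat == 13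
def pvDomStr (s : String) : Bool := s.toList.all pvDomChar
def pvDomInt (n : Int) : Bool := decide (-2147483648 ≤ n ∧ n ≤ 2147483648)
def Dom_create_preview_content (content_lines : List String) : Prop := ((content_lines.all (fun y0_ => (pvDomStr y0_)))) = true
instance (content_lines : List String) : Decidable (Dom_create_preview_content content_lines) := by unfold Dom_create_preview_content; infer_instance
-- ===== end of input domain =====

-- B replaces A's single index-guarded pass by a slice, a "$$"-parity count, and a
-- break-on-first-"$$" extension loop (objective: simpler decomposition; same cost).

-- ===== PORT A =====
-- one pass over enumerate(content_lines) carrying (i, in_math_block, preview_lines)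
def pvALoop : List String → Nat → Bool → List String → List String
  | [], _, _, acc => acc
  | l :: rest, i, inMath, acc =>
    if 20 ≤ i ∧ inMath = false then acc
    else
      let inMath' := if PySem.Str.strip l == "$$" then !inMath else inMath
      pvALoop rest (i + 1) inMath' (acc ++ [l])

def create_preview_content (content_lines : List String) : List String :=
  pvALoop content_lines 0 false []

-- ===== PORT B =====
-- extension loop: append each line, break right after the first "$$"
def pvBExtend : List String → List String
  | [] => []
  | l :: rest => if PySem.Str.strip l == "$$" then [l] else l :: pvBExtend rest

def create_preview_content_alt (content_lines : List String) : List String :=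
  let preview := PySem.List.slice content_lines none (some 20)
  if (preview.countP (fun l => PySem.Str.strip l == "$$")) % 2 == 0 then preview
  else preview ++ pvBExtend (PySem.List.slice content_lines (some 20) none)

-- ===== PRECONDITION & SPEC =====
def Spec_create_preview_content (content_lines : List String) (out : List String) : Prop := out = create_preview_content_alt content_lines
instance (content_lines : List String) (out : List String) : Decidable (Spec_create_preview_content content_lines out) := by unfold Spec_create_preview_content; infer_instance

-- ===== CLAIM (what is proved, stated in full; the proofs are below) =====
def Claim_equal_create_preview_content : Prop := ∀ (content_lines : List String), Dom_create_preview_content content_lines → Spec_create_preview_content content_lines (create_preview_content content_lines)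

-- ===== LEMMAS AND PROOFS =====

theorem pvALoop_acc (lines : List String) : ∀ (i : Nat) (b : Bool) (acc : List String),
    pvALoop lines i b acc = acc ++ pvALoop lines i b [] := by
  induction lines with
  | nil => intro i b acc; simp [pvALoop]
  | cons l rest ih =>
    intro i b acc
    by_cases h : 20 ≤ i ∧ b = false
    · simp [pvALoop, h]
    · simp only [pvALoop, if_neg h]
      rw [ih _ _ (acc ++ [l]), ih _ _ ([] ++ [l])]
      simp

theorem pvALoop_ge_false (lines : List String) (i : Nat) (h : 20 ≤ i) :
    pvALoop lines i false [] = [] := by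
  cases lines with
  | nil => simp [pvALoop]
  | cons l rest => simp [pvALoop, h]

theorem pvALoop_ge_true (lines : List String) : ∀ (i : Nat), 20 ≤ i →
    pvALoop lines i true [] = pvBExtend lines := by
  induction lines with
  | nil => intro i _; simp [pvALoop, pvBExtend]
  | cons l rest ih =>
    intro i h
    simp only [pvALoop, pvBExtend]
    rw [if_neg (by simp)]
    by_cases hl : PySem.Str.strip l == "$$"
    · rw [pvALoop_acc]
      have hz := pvALoop_ge_false rest (i + 1) (by omega)
      simp [hl, hz]
    · simp only [hl]
      rw [if_neg (by simp), if_neg (by simp)]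
      rw [pvALoop_acc]
      simp [ih (i + 1) (by omega)]

theorem pvALoop_main (lines : List String) : ∀ (i : Nat) (b : Bool), i ≤ 20 →
    pvALoop lines i b [] =
      lines.take (20 - i) ++
        (if b.xor ((lines.take (20 - i)).countP (fun l => PySem.Str.strip l == "$$") % 2 == 1)
         then pvBExtend (lines.drop (20 - i)) else []) := by
  induction lines with
  | nil =>
    intro i b _
    simp [pvALoop, pvBExtend]
  | cons l rest ih =>
    intro i b hi
    rcases Nat.lt_or_ge i 20 with hlt | hge
    · have hsub : 20 - i = (20 - (i + 1)) + 1 := by omega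
      simp only [pvALoop]
      rw [if_neg (by omega)]
      rw [pvALoop_acc]
      rw [ih (i + 1) _ (by omega)]
      rw [hsub]
      simp only [List.take_succ_cons, List.drop_succ_cons, List.countP_cons]
      by_cases hl : PySem.Str.strip l == "$$"
      · simp only [hl]
        have : ∀ c : Nat, ((c + 1) % 2 == 1) = !(c % 2 == 1) := by
          intro c; rcases Nat.mod_two_eq_zero_or_one c with h | h <;>
            simp [Nat.add_mod, h]
        simp [this]
      · simp [hl]
    · have h20 : i = 20 := by omega
      subst h20
      simp only [Nat.sub_self, List.take_zero, List.drop_zero, List.countP_nil,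
        List.nil_append]
      cases b with
      | false => simp [pvALoop_ge_false (l :: rest) 20 (by omega)]
      | true => simp [pvALoop_ge_true (l :: rest) 20 (by omega)]

-- ===== VERDICT (by name: the statement is the Claim_ definition above) =====
theorem create_preview_content_spec : Claim_equal_create_preview_content := by
  intro lines _
  unfold Spec_create_preview_content create_preview_content create_preview_content_alt
  rw [pvALoop_main lines 0 false (by omega)]
  have h1 : PySem.List.slice lines none (some 20) = lines.take 20 := by simp [pysem]
  have h2 : PySem.List.slice lines (some 20) none = lines.drop 20 := by simp [pysem]
  rw [h1, h2]
  simp only [Bool.false_xor, Nat.sub_zero]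
  rcases Nat.mod_two_eq_zero_or_one
      ((lines.take 20).countP (fun l => PySem.Str.strip l == "$$")) with h | h <;>
    simp [h]
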